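-- pv_equiv track=rewrite | github.com/heschmidt04/python-gdi-algorithms | run_length_encoding.py | compressSquareImage
-- ===== SOURCE A (Python) =====
-- def compressSquareImage(image, size):
--     """
--     This function takes an image and returns the concatenation of
--         size of image - assuming each side is equal
--         x
--         image run length encoding
--
--     :param image: str
--     :param size: int
--     :return: string
--
--     >>> compressSquareImage("RRRGGGBBB",size=3)
--     '3xR3G3B3'
--     >>> compressSquareImage("QGB",3)
--     'This image has more than R, G, B - please review and fix'
--     """
--     # Read in the image does it have some other letter than RGB?
--     for char in image:
--         if char not in ["R", "G", "B"]:
--             return f"This image has more than R, G, B - please review and fix"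
--     # Each letter in the string is R, G or B
--     r_count = image.count("R")
--     g_count = image.count("G")
--     b_count = image.count("B")
--
--     color_counts = f"R{r_count}G{g_count}B{b_count}"
--     run_length_encoding = f"{size}x{color_counts}"
--     # return the size of image + x + run length encoding
--     return run_length_encoding
-- ===== SOURCE B (Python) =====
-- def compressSquareImage(image, size):
--     r = g = b = 0
--     for char in image:
--         if char == "R":
--             r += 1
--         elif char == "G":
--             g += 1
--         elif char == "B":
--             b += 1
--         else:
--             return "This image has more than R, G, B - please review and fix"
--     return f"{size}xR{r}G{g}B{b}"
-- ===== Notes on version B (the rewrite author's own statement) =====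
-- stated objective: alternative
-- what changed: Replaces A's validation loop plus three separate .count passes with a single pass that validates and maintains three integer counters, returning the error at the first invalid character.
import Mathlib
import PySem

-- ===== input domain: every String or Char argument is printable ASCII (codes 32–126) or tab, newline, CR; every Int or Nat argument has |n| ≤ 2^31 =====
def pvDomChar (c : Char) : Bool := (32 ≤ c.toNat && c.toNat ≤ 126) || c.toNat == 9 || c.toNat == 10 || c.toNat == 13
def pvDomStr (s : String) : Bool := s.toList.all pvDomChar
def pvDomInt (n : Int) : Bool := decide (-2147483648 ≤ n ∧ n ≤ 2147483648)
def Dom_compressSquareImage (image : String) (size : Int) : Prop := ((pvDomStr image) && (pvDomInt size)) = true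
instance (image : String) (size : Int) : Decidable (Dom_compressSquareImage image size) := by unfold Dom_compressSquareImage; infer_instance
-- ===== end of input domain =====

-- B merges A's validation loop and its three .count passes into one validating-and-counting pass (alternative decomposition; same cost class).


-- ===== PORT A =====
-- A's validation loop: early return of the error string at the first char not in ["R","G","B"].
def pvALoop : List Char → Option String
  | [] => none
  | c :: rest =>
    if ¬ (c ∈ ['R', 'G', 'B']) then some "This image has more than R, G, B - please review and fix"
    else pvALoop rest

def compressSquareImage (image : String) (size : Int) : String :=
  match pvALoop image.toList with
  | some err => err
  | none =>
    let rCount : Int := PySem.Str.count image "R"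
    let gCount : Int := PySem.Str.count image "G"
    let bCount : Int := PySem.Str.count image "B"
    let colorCounts := "R" ++ PySem.Int.toStr rCount ++ "G" ++ PySem.Int.toStr gCount ++ "B" ++ PySem.Int.toStr bCount
    PySem.Int.toStr size ++ "x" ++ colorCounts

-- ===== PORT B =====
-- B's single pass: three running counters, error returned at the first invalid char.
def pvBLoop (size : Int) : List Char → Int → Int → Int → String
  | [], r, g, b =>
      PySem.Int.toStr size ++ "x" ++ ("R" ++ PySem.Int.toStr r ++ "G" ++ PySem.Int.toStr g ++ "B" ++ PySem.Int.toStr b)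
  | c :: rest, r, g, b =>
    if c = 'R' then pvBLoop size rest (r + 1) g b
    else if c = 'G' then pvBLoop size rest r (g + 1) b
    else if c = 'B' then pvBLoop size rest r g (b + 1)
    else "This image has more than R, G, B - please review and fix"

def compressSquareImage_alt (image : String) (size : Int) : String :=
  pvBLoop size image.toList 0 0 0

-- ===== PRECONDITION & SPEC =====
def Spec_compressSquareImage (image : String) (size : Int) (out : String) : Prop := out = compressSquareImage_alt image size
instance (image : String) (size : Int) (out : String) : Decidable (Spec_compressSquareImage image size out) := by unfold Spec_compressSquareImage; infer_instance

-- ===== CLAIM (what is proved, stated in full; the proofs are below) =====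
def Claim_equal_compressSquareImage : Prop := ∀ (image : String) (size : Int), Dom_compressSquareImage image size → Spec_compressSquareImage image size (compressSquareImage image size)

-- ===== LEMMAS AND PROOFS =====

-- PySem.Chars.count with a single-character needle is List.count.
theorem pv_count_go_single (c : Char) : ∀ (l : List Char) (acc : Nat),
    PySem.Chars.count.go [c] l.length l acc = acc + l.count c
  | [], acc => by simp [PySem.Chars.count.go]
  | h :: t, acc => by
    rw [List.length_cons, PySem.Chars.count.go]
    by_cases hc : c = h
    · subst hc
      simp [List.isPrefixOf, pv_count_go_single c t (acc + 1)]
      omega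
    · simp [List.isPrefixOf, hc, pv_count_go_single c t acc, Ne.symm hc]

theorem pv_count_single (cs : List Char) (c : Char) :
    PySem.Chars.count cs [c] = cs.count c := by
  simp [PySem.Chars.count, pv_count_go_single]

-- B's loop, related to A's validation result and the suffix counts.
theorem pvBLoop_eq (size : Int) : ∀ (cs : List Char) (r g b : Int),
    pvBLoop size cs r g b =
      match pvALoop cs with
      | some e => e
      | none =>
        PySem.Int.toStr size ++ "x" ++
          ("R" ++ PySem.Int.toStr (r + cs.count 'R') ++ "G" ++ PySem.Int.toStr (g + cs.count 'G') ++
            "B" ++ PySem.Int.toStr (b + cs.count 'B'))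
  | [], r, g, b => by simp [pvBLoop, pvALoop]
  | c :: rest, r, g, b => by
    rw [pvBLoop, pvALoop]
    by_cases hR : c = 'R'
    · subst hR
      simp [pvBLoop_eq size rest]
      cases pvALoop rest <;> simp <;> ring_nf
    · by_cases hG : c = 'G'
      · subst hG
        simp [hR, pvBLoop_eq size rest]
        cases pvALoop rest <;> simp <;> ring_nf
      · by_cases hB : c = 'B'
        · subst hB
          simp [hR, hG, pvBLoop_eq size rest]
          cases pvALoop rest <;> simp <;> ring_nf
        · simp [hR, hG, hB]

-- ===== VERDICT (by name: the statement is the Claim_ definition above) =====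
theorem compressSquareImage_spec : Claim_equal_compressSquareImage := by
  intro image size _
  unfold Spec_compressSquareImage compressSquareImage compressSquareImage_alt
  rw [pvBLoop_eq]
  cases h : pvALoop image.toList <;>
    simp [pv_count_single]
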